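-- pv_equiv track=rewrite | github.com/SB62/cs50py | problem_set_2/plates.py | is_valid_vanity_plate
-- ===== SOURCE A (Python) =====
-- def is_valid_vanity_plate(plate):
--     # Check length of the plate
--     if not (2 <= len(plate) <= 6):
--         return False
--
--     # Check for no periods, spaces, or punctuation marks
--     if not plate.isalnum():
--         return False
--
--     # Check if the plate starts with at least two letters
--     if not plate[:2].isalpha():
--         return False
--
--     # Check for the valid placement of numbers
--     if any(char.isdigit() for char in plate):
--         # Find the first digit in the plate
--         first_digit_index = next((i for i, char in enumerate(plate) if char.isdigit()), len(plate))
--         # Ensure all characters after the first digit are also digits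
--         if not plate[first_digit_index:].isdigit():
--             return False
--         # Ensure the first digit is not '0'
--         if plate[first_digit_index] == '0':
--             return False
--
--     return True
-- ===== SOURCE B (Python) =====
-- def is_valid_vanity_plate(plate):
--     # Single forward pass with a seen_digit state machine (alternative decomposition).
--     if not (2 <= len(plate) <= 6):
--         return False
--     seen_digit = False
--     for i, c in enumerate(plate):
--         if c.isdigit():
--             if not seen_digit:
--                 if i < 2 or c == '0':
--                     return False
--                 seen_digit = True
--         else:
--             if seen_digit or not c.isalpha():
--                 return False
--     return True
-- ===== Notes on version B (the rewrite author's own statement) =====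
-- stated objective: alternative
-- what changed: A's four separate scans of the plate (isalnum pass, any-digit pass, enumerate search for the first digit, tail-slice isdigit check) are replaced by a single forward state-machine pass over enumerate(plate) that tracks one boolean seen_digit.
import Mathlib
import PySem

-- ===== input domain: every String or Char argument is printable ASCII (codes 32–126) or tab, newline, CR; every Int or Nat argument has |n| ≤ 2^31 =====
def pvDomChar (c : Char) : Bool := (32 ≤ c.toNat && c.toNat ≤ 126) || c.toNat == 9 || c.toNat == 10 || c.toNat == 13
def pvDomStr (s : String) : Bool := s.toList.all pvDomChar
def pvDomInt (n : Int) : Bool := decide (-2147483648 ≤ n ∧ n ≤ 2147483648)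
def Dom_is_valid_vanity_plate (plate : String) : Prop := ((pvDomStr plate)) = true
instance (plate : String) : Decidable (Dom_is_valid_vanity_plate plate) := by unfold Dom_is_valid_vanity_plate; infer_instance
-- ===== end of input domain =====

-- B replaces A's four separate scans (isalnum, any-digit, first-digit search, tail slice) with one
-- forward state-machine pass over enumerate(plate); objective: alternative decomposition, same cost.


-- ===== PORT A =====
def is_valid_vanity_plate (plate : String) : Bool :=
  let cs := plate.toList
  -- if not (2 <= len(plate) <= 6): return False
  if !(decide ((2:Int) ≤ PySem.Chars.len cs) && decide (PySem.Chars.len cs ≤ (6:Int))) then false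
  -- if not plate.isalnum(): return False
  else if !(PySem.Chars.strIsalnum cs) then false
  -- if not plate[:2].isalpha(): return False
  else if !(PySem.Chars.strIsalpha (PySem.Chars.slice cs none (some 2))) then false
  -- if any(char.isdigit() for char in plate):
  else if cs.any PySem.Chars.isdigit then
    -- first_digit_index = next((i for i, char in enumerate(plate) if char.isdigit()), len(plate))
    let firstDigitIndex : Int :=
      match (PySem.List.enumerate cs 0).find? (fun p => PySem.Chars.isdigit p.2) with
      | some p => p.1
      | none => PySem.Chars.len cs
    -- if not plate[first_digit_index:].isdigit(): return False
    if !(PySem.Chars.strIsdigit (PySem.Chars.slice cs (some firstDigitIndex) none)) then false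
    -- if plate[first_digit_index] == '0': return False  (index always in range in this branch)
    else if PySem.List.pyGet? cs firstDigitIndex == some '0' then false
    else true
  else true

-- ===== PORT B =====
-- the for-loop of Source B: state = seen_digit
def pvAltLoop : List (Int × Char) → Bool → Bool
  | [], _ => true
  | (i, c) :: rest, seen =>
    if PySem.Chars.isdigit c then
      if !seen then
        if decide (i < 2) || c == '0' then false else pvAltLoop rest true
      else pvAltLoop rest seen
    else
      if seen || !(PySem.Chars.isalpha c) then false
      else pvAltLoop rest seen

def is_valid_vanity_plate_alt (plate : String) : Bool :=
  let cs := plate.toList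
  if !(decide ((2:Int) ≤ PySem.Chars.len cs) && decide (PySem.Chars.len cs ≤ (6:Int))) then false
  else pvAltLoop (PySem.List.enumerate cs 0) false

-- ===== PRECONDITION & SPEC =====
def Spec_is_valid_vanity_plate (plate : String) (out : Bool) : Prop := out = is_valid_vanity_plate_alt plate
instance (plate : String) (out : Bool) : Decidable (Spec_is_valid_vanity_plate plate out) := by unfold Spec_is_valid_vanity_plate; infer_instance

-- ===== CLAIM (what is proved, stated in full; the proofs are below) =====
def Claim_equal_is_valid_vanity_plate : Prop := ∀ (plate : String), Dom_is_valid_vanity_plate plate → Spec_is_valid_vanity_plate plate (is_valid_vanity_plate plate)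

-- ===== LEMMAS AND PROOFS =====

-- character-class facts (PySem's ASCII predicates)
theorem pv_alpha_not_digit (c : Char) (h : PySem.Chars.isalpha c = true) :
    PySem.Chars.isdigit c = false := by
  revert h
  simp [PySem.Chars.isalpha, PySem.Chars.isdigit, PySem.Chars.isupper, PySem.Chars.islower,
        Char.le_def, UInt32.le_iff_toNat_le]
  omega

theorem pv_alpha_alnum (c : Char) (h : PySem.Chars.isalpha c = true) :
    PySem.Chars.isalnum c = true := by
  simp [PySem.Chars.isalnum, h]

theorem pv_digit_alnum (c : Char) (h : PySem.Chars.isdigit c = true) :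
    PySem.Chars.isalnum c = true := by
  simp [PySem.Chars.isalnum, h]

theorem pv_all_digit_alnum (t : List Char) (h : t.all PySem.Chars.isdigit = true) :
    t.all PySem.Chars.isalnum = true := by
  simp only [List.all_eq_true] at h ⊢
  exact fun c hc => pv_digit_alnum c (h c hc)

-- the spec both tails compute: letters then digits, first digit not '0'
def pvTail : List Char → Bool
  | [] => true
  | c :: r =>
    if PySem.Chars.isdigit c then !(decide (c = '0')) && r.all PySem.Chars.isdigit
    else PySem.Chars.isalpha c && pvTail r

-- B's loop with seen_digit = True accepts exactly all-digit tails
theorem pvAltLoop_seen (r : List Char) (s : Int) :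
    pvAltLoop (PySem.List.enumerate r s) true = r.all PySem.Chars.isdigit := by
  induction r generalizing s with
  | nil => simp [PySem.List.enumerate_nil, pvAltLoop]
  | cons c r ih =>
    rw [PySem.List.enumerate_cons]
    by_cases hd : PySem.Chars.isdigit c
    · simp [pvAltLoop, hd, ih]
    · simp [pvAltLoop, hd]

-- B's loop from index ≥ 2 with seen_digit = False computes pvTail
theorem pvAltLoop_tail (r : List Char) (s : Int) (hs : 2 ≤ s) :
    pvAltLoop (PySem.List.enumerate r s) false = pvTail r := by
  induction r generalizing s with
  | nil => simp [PySem.List.enumerate_nil, pvAltLoop, pvTail]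
  | cons c r ih =>
    rw [PySem.List.enumerate_cons]
    by_cases hd : PySem.Chars.isdigit c
    · simp [pvAltLoop, pvTail, hd, show ¬ (s < 2) by omega, pvAltLoop_seen, beq_iff_eq]
    · simp [pvAltLoop, pvTail, hd, ih (s+1) (by omega)]

-- A's tail checks (all alnum; from the first digit on, all digits and not starting with '0') = pvTail
theorem pv_tail_eq (t : List Char) :
    (t.all PySem.Chars.isalnum &&
      (match t.findIdx? PySem.Chars.isdigit with
       | none => true
       | some j => PySem.Chars.strIsdigit (t.drop j) && !(t[j]? == some '0'))) = pvTail t := by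
  induction t with
  | nil => simp [pvTail]
  | cons c r ih =>
    by_cases hd : PySem.Chars.isdigit c
    · have hfi : (c :: r).findIdx? PySem.Chars.isdigit = some 0 := by
        rw [List.findIdx?_cons]; simp [hd]
      rw [hfi]
      cases hr : r.all PySem.Chars.isdigit with
      | true =>
        have hra := pv_all_digit_alnum r hr
        simp [pvTail, PySem.Chars.strIsdigit, hd, hr, pv_digit_alnum c hd, hra,
              Bool.beq_eq_decide_eq]
      | false =>
        have hsd : PySem.Chars.strIsdigit (c :: r) = false := by
          simp [PySem.Chars.strIsdigit, hr]
        simp [pvTail, hsd, hr, hd]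
    · have hfi : (c :: r).findIdx? PySem.Chars.isdigit
          = (r.findIdx? PySem.Chars.isdigit).map (· + 1) := by
        rw [List.findIdx?_cons]; simp [hd]
      rw [hfi]
      simp only [pvTail, hd, Bool.false_eq_true, if_false]
      by_cases ha : PySem.Chars.isalpha c
      · cases hfi : r.findIdx? PySem.Chars.isdigit with
        | none =>
          rw [hfi] at ih
          simp only [Option.map_none]
          simpa [ha, pv_alpha_alnum c ha] using ih
        | some j =>
          rw [hfi] at ih
          simp only [Option.map_some, List.drop_succ_cons, List.getElem?_cons_succ]
          simpa [ha, pv_alpha_alnum c ha] using ih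
      · have hn : PySem.Chars.isalnum c = false := by
          simp [PySem.Chars.isalnum, ha, hd]
        cases hfi : r.findIdx? PySem.Chars.isdigit <;> simp [hn, ha]

-- first component of A's next(...) search = findIdx?
theorem pv_find_enum (t : List Char) (s : Nat) :
    ((PySem.List.enumerate t (s:Int)).find? (fun p => PySem.Chars.isdigit p.2)).map Prod.fst
      = (t.findIdx? PySem.Chars.isdigit).map (fun j => ((s + j : Nat) : Int)) := by
  induction t generalizing s with
  | nil => simp [PySem.List.enumerate_nil]
  | cons c r ih =>
    rw [PySem.List.enumerate_cons, List.findIdx?_cons]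
    by_cases hd : PySem.Chars.isdigit c
    · simp [hd]
    · rw [List.find?_cons_of_neg (by simp [hd]), if_neg (by simp [hd])]
      have : ((s:Int) + 1) = ((s+1 : Nat) : Int) := by push_cast; ring
      rw [this, ih (s+1)]
      cases r.findIdx? PySem.Chars.isdigit <;> simp
      omega

-- the two port bodies agree on any character list
set_option maxRecDepth 4096 in
theorem pv_main (cs : List Char) :
    (if !(decide ((2:Int) ≤ PySem.Chars.len cs) && decide (PySem.Chars.len cs ≤ (6:Int))) then false
     else if !(PySem.Chars.strIsalnum cs) then false
     else if !(PySem.Chars.strIsalpha (PySem.Chars.slice cs none (some 2))) then false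
     else if cs.any PySem.Chars.isdigit then
       (let firstDigitIndex : Int :=
          match (PySem.List.enumerate cs 0).find? (fun p => PySem.Chars.isdigit p.2) with
          | some p => p.1
          | none => PySem.Chars.len cs
        if !(PySem.Chars.strIsdigit (PySem.Chars.slice cs (some firstDigitIndex) none)) then false
        else if PySem.List.pyGet? cs firstDigitIndex == some '0' then false
        else true)
     else true)
    =
    (if !(decide ((2:Int) ≤ PySem.Chars.len cs) && decide (PySem.Chars.len cs ≤ (6:Int))) then false
     else pvAltLoop (PySem.List.enumerate cs 0) false) := by
  by_cases hlen : ((2:Int) ≤ PySem.Chars.len cs ∧ PySem.Chars.len cs ≤ (6:Int))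
  case neg =>
    have hc : (decide ((2:Int) ≤ PySem.Chars.len cs) && decide (PySem.Chars.len cs ≤ (6:Int))) = false := by
      rcases not_and_or.mp hlen with h | h <;> simp [PySem.Chars.len] at h ⊢ <;> omega
    simp only [hc]
    rfl
  simp only [decide_eq_true hlen.1, decide_eq_true hlen.2, Bool.and_self, Bool.not_true,
    Bool.false_eq_true, if_false]
  have h2 : 2 ≤ cs.length := by
    have := hlen.1; simp [PySem.Chars.len] at this; omega
  obtain ⟨a, b, t, rfl⟩ : ∃ a b t, cs = a :: b :: t := by
    match cs, h2 with
    | a :: b :: t, _ => exact ⟨a, b, t, rfl⟩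
  -- plate[:2] = [a, b]
  have hsl : PySem.Chars.slice (a :: b :: t) none (some 2) = [a, b] := by
    have h := PySem.List.slice_to_natCast (a :: b :: t) 2
    simpa using h
  rw [hsl]
  -- B\'s side: peel the first two loop steps
  rw [PySem.List.enumerate_cons, PySem.List.enumerate_cons,
      show ((0:Int) + 1 + 1) = 2 by norm_num, show ((0:Int) + 1) = 1 by norm_num]
  by_cases ha : PySem.Chars.isalpha a
  case neg =>
    by_cases hda : PySem.Chars.isdigit a
    · simp [pvAltLoop, hda, ha, PySem.Chars.strIsalpha, PySem.Chars.strIsalnum]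
    · have : PySem.Chars.isalnum a = false := by simp [PySem.Chars.isalnum, ha, hda]
      simp [pvAltLoop, hda, ha, this, PySem.Chars.strIsalnum]
  by_cases hb : PySem.Chars.isalpha b
  case neg =>
    have hda := pv_alpha_not_digit a ha
    by_cases hdb : PySem.Chars.isdigit b
    · simp [pvAltLoop, hda, ha, hdb, hb, PySem.Chars.strIsalpha]
    · have : PySem.Chars.isalnum b = false := by simp [PySem.Chars.isalnum, hb, hdb]
      simp [pvAltLoop, hda, ha, hdb, hb, this, PySem.Chars.strIsalnum]
  -- both first characters are letters
  have hda := pv_alpha_not_digit a ha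
  have hdb := pv_alpha_not_digit b hb
  have hB : pvAltLoop ((0, a) :: ((1:Int), b) :: PySem.List.enumerate t 2) false = pvTail t := by
    simp [pvAltLoop, hda, hdb, ha, hb, pvAltLoop_tail t 2 (by norm_num)]
  rw [hB]
  -- A\'s side
  simp only [PySem.Chars.strIsalpha, PySem.Chars.strIsalnum, List.isEmpty_cons, Bool.not_false,
    List.all_cons, ha, hb, pv_alpha_alnum a ha, pv_alpha_alnum b hb, Bool.true_and,
    List.any_cons, hda, hdb, Bool.false_or]
  by_cases hany : t.any PySem.Chars.isdigit
  · simp only [hany, if_true]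
    obtain ⟨j, hj⟩ : ∃ j, t.findIdx? PySem.Chars.isdigit = some j := by
      have hs := List.findIdx?_isSome (p := PySem.Chars.isdigit) (xs := t)
      rw [hany] at hs
      exact Option.isSome_iff_exists.mp hs
    have hstep : List.find? (fun p => PySem.Chars.isdigit p.2)
        ((0, a) :: ((1:Int), b) :: PySem.List.enumerate t 2)
        = List.find? (fun p => PySem.Chars.isdigit p.2) (PySem.List.enumerate t 2) := by
      rw [List.find?_cons_of_neg (by simp [hda]), List.find?_cons_of_neg (by simp [hdb])]
    have hfe := pv_find_enum t 2
    rw [hj] at hfe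
    simp only [Option.map_some, Nat.cast_ofNat] at hfe
    rw [show (2 + j) = (j + 2) by omega] at hfe
    obtain ⟨p, hp⟩ : ∃ p, (PySem.List.enumerate t 2).find?
        (fun p => PySem.Chars.isdigit p.2) = some p := by
      cases hq : (PySem.List.enumerate t 2).find? (fun p => PySem.Chars.isdigit p.2) with
      | none => rw [hq] at hfe; simp at hfe
      | some p => exact ⟨p, rfl⟩
    rw [hp] at hfe
    simp only [Option.map_some, Option.some.injEq] at hfe
    rw [hstep, hp]
    simp only [hfe]
    rw [PySem.Chars.slice_eq_listSlice, PySem.List.slice_from_natCast, PySem.List.pyGet?_natCast]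
    have hdrop : (a :: b :: t).drop (j + 2) = t.drop j := by
      simp [show j + 2 = j + 1 + 1 by ring, List.drop_succ_cons]
    have hget : (a :: b :: t)[j + 2]? = t[j]? := by
      simp [show j + 2 = j + 1 + 1 by ring]
    rw [hdrop, hget]
    have hq2 : (t.all PySem.Chars.isalnum &&
        (PySem.Chars.strIsdigit (t.drop j) && !(t[j]? == some '0'))) = pvTail t := by
      rw [← pv_tail_eq t, hj]
    rw [← hq2]
    cases t.all PySem.Chars.isalnum <;>
      cases hsd : PySem.Chars.strIsdigit (t.drop j) <;>
      cases hg : (t[j]? == some '0') <;>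
      simp
  · simp only [hany, Bool.false_eq_true, if_false]
    have hn : t.findIdx? PySem.Chars.isdigit = none := by
      rw [List.findIdx?_eq_none_iff]
      intro x hx
      have hxx : t.any PySem.Chars.isdigit = false := by simpa using hany
      rw [List.any_eq_false] at hxx
      simpa using hxx x hx
    have hq := pv_tail_eq t
    rw [hn] at hq
    rw [← hq]
    cases t.all PySem.Chars.isalnum <;> simp

-- ===== VERDICT (by name: the statement is the Claim_ definition above) =====
theorem is_valid_vanity_plate_spec : Claim_equal_is_valid_vanity_plate := by
  intro plate _
  unfold Spec_is_valid_vanity_plate is_valid_vanity_plate is_valid_vanity_plate_alt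
  exact pv_main plate.toList
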